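-- pv_equiv track=rewrite | github.com/arstwschool/AutoRenamer | ui_dnd.py | parse_dnd_files
-- ===== SOURCE A (Python) =====
-- def parse_dnd_files(data_str):
--     files = []
--     buf = ""
--     in_curly = False
--     for char in data_str:
--         if char == '{': in_curly = True
--         elif char == '}': in_curly = False
--         elif char == ' ' and not in_curly:
--             if buf: files.append(buf); buf = ""
--         else: buf += char
--     if buf: files.append(buf)
--     return files
-- ===== SOURCE B (Python) =====
-- def parse_dnd_files(data_str):
--     # Segment-based parser: braces are the delimiters.  Cut the input at every
--     # brace character; a segment following '{' is inside a group (its spaces are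
--     # part of the token), any other segment is outside and is split on spaces.
--     files = []
--     buf = ""
--     inside = False
--     pos = 0
--     n = len(data_str)
--     while pos <= n:
--         nb = n
--         for k in (data_str.find('{', pos), data_str.find('}', pos)):
--             if k != -1 and k < nb:
--                 nb = k
--         seg = data_str[pos:nb]
--         if inside:
--             buf += seg
--         else:
--             pieces = seg.split(' ')
--             for p in pieces[:-1]:
--                 buf += p
--                 if buf:
--                     files.append(buf)
--                 buf = ""
--             buf += pieces[-1]
--         if nb == n:
--             break
--         inside = data_str[nb] == '{'
--         pos = nb + 1
--     if buf:
--         files.append(buf)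
--     return files
-- ===== Notes on version B (the rewrite author's own statement) =====
-- stated objective: faster
-- what changed: Replaced A's character-by-character state machine with a segment tokenizer: the input is cut at every brace character via str.find, each between-brace segment is handled whole (appended verbatim when it follows '{', split on spaces with str.split otherwise), so the per-character Python loop disappears.
import Mathlib
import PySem

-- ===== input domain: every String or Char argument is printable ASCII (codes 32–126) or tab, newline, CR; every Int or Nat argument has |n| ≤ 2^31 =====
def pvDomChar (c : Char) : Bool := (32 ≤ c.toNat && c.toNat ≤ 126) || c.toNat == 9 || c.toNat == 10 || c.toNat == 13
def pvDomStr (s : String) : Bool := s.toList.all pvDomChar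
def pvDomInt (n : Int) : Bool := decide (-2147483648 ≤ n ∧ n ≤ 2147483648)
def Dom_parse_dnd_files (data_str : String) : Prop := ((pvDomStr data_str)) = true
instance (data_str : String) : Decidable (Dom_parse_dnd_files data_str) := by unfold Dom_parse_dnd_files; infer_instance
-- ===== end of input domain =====

-- B replaces A's char-by-char state machine with a segment tokenizer that cuts the input
-- at every brace character and handles each between-brace segment whole with bulk string
-- operations (objective: faster by a constant factor, measured).

-- ===== PORT A =====
-- A's for-loop, state (files, buf, in_curly); final flush at [].
def parseA_go (files : List String) (buf : List Char) (inc : Bool) : List Char → List String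
  | [] => if buf.isEmpty then files else files ++ [String.mk buf]
  | c :: rest =>
    if c = '{' then parseA_go files buf true rest
    else if c = '}' then parseA_go files buf false rest
    else if c = ' ' ∧ ¬ inc then
      (if buf.isEmpty then parseA_go files buf inc rest
       else parseA_go (files ++ [String.mk buf]) [] inc rest)
    else parseA_go files (buf ++ [c]) inc rest

def parse_dnd_files (data_str : String) : List String :=
  parseA_go [] [] false data_str.toList

-- ===== PORT B =====
-- a character that is not a brace (the segment chars of Source B)
def plainB (c : Char) : Bool := c != '{' && c != '}'

-- seg.split(' ') of Source B (Python's split keeps empty pieces; "" -> [""])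
def splitSpB : List Char → List (List Char)
  | [] => [[]]
  | c :: r =>
    if c = ' ' then [] :: splitSpB r
    else
      match splitSpB r with
      | p :: ps => (c :: p) :: ps
      | [] => [[c]]

-- the for-loop over pieces[:-1] followed by buf += pieces[-1]
def emitPiecesB (files : List String) (buf : List Char) : List (List Char) → List String × List Char
  | [] => (files, buf)
  | [p] => (files, buf ++ p)
  | p :: ps =>
    let b := buf ++ p
    emitPiecesB (if b.isEmpty then files else files ++ [String.mk b]) [] ps

-- outer while-loop of Source B: take the segment up to the next brace, process it whole,
-- then continue past the brace with the new inside flag (find of the next brace is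
-- ported as takeWhile/dropWhile at the first brace char).
def parseB_go (files : List String) (buf : List Char) (inside : Bool) (l : List Char) : List String :=
  let seg := l.takeWhile plainB
  let fb := if inside then (files, buf ++ seg) else emitPiecesB files buf (splitSpB seg)
  match h : l.dropWhile plainB with
  | [] => if fb.2.isEmpty then fb.1 else fb.1 ++ [String.mk fb.2]
  | b :: rest => parseB_go fb.1 fb.2 (b == '{') rest
termination_by l.length
decreasing_by
  have h1 : (l.dropWhile plainB).length ≤ l.length := List.length_dropWhile_le _ _
  rw [h] at h1; simp at h1; omega

def parse_dnd_files_alt (data_str : String) : List String :=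
  parseB_go [] [] false data_str.toList

-- ===== PRECONDITION & SPEC =====
def Spec_parse_dnd_files (data_str : String) (out : List String) : Prop := out = parse_dnd_files_alt data_str
instance (data_str : String) (out : List String) : Decidable (Spec_parse_dnd_files data_str out) := by unfold Spec_parse_dnd_files; infer_instance

-- ===== CLAIM (what is proved, stated in full; the proofs are below) =====
def Claim_equal_parse_dnd_files : Prop := ∀ (data_str : String), Dom_parse_dnd_files data_str → Spec_parse_dnd_files data_str (parse_dnd_files data_str)

-- ===== LEMMAS AND PROOFS =====

-- one-step rewrite lemmas for the A loop
theorem parseA_go_space_out (files : List String) (buf : List Char) (rest : List Char) :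
    parseA_go files buf false (' ' :: rest) =
      if buf.isEmpty then parseA_go files buf false rest
      else parseA_go (files ++ [String.mk buf]) [] false rest := by
  simp [parseA_go]

theorem parseA_go_true_char (c : Char) (files : List String) (buf : List Char) (rest : List Char)
    (h1 : c ≠ '{') (h2 : c ≠ '}') :
    parseA_go files buf true (c :: rest) = parseA_go files (buf ++ [c]) true rest := by
  simp [parseA_go, h1, h2]

theorem parseA_go_false_char (c : Char) (files : List String) (buf : List Char) (rest : List Char)
    (h1 : c ≠ '{') (h2 : c ≠ '}') (h3 : c ≠ ' ') :
    parseA_go files buf false (c :: rest) = parseA_go files (buf ++ [c]) false rest := by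
  simp [parseA_go, h1, h2, h3]

-- splitSpB never returns the empty list of pieces
theorem splitSpB_ne_nil (l : List Char) : splitSpB l ≠ [] := by
  cases l with
  | nil => simp [splitSpB]
  | cons c r =>
    simp only [splitSpB]
    split
    · simp
    · split <;> simp

-- emitPiecesB rewrite lemmas
theorem emitPiecesB_empty_piece (files : List String) (buf : List Char)
    (ps : List (List Char)) (hps : ps ≠ []) :
    emitPiecesB files buf ([] :: ps) =
      emitPiecesB (if buf.isEmpty then files else files ++ [String.mk buf]) [] ps := by
  cases ps with
  | nil => exact absurd rfl hps
  | cons q qs => simp [emitPiecesB]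

theorem emitPiecesB_cons_char (files : List String) (buf : List Char) (c : Char)
    (p : List Char) (ps : List (List Char)) :
    emitPiecesB files buf ((c :: p) :: ps) = emitPiecesB files (buf ++ [c]) (p :: ps) := by
  cases ps with
  | nil => simp [emitPiecesB]
  | cons q qs => simp [emitPiecesB]

-- A inside braces consumes a brace-free segment by appending it to buf wholesale
theorem parseA_seg_true (seg : List Char) (hseg : ∀ c ∈ seg, plainB c = true) :
    ∀ (files : List String) (buf tail : List Char),
      parseA_go files buf true (seg ++ tail) = parseA_go files (buf ++ seg) true tail := by
  induction seg with
  | nil => intro files buf tail; simp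
  | cons c r ih =>
    intro files buf tail
    have hc := hseg c (by simp)
    simp only [plainB, Bool.and_eq_true, bne_iff_ne, ne_eq] at hc
    rw [List.cons_append, parseA_go_true_char c files buf _ hc.1 hc.2,
      ih (fun x hx => hseg x (by simp [hx]))]
    simp

-- A outside braces consumes a brace-free segment exactly as emitPiecesB ∘ splitSpB does
theorem parseA_seg_false (seg : List Char) (hseg : ∀ c ∈ seg, plainB c = true) :
    ∀ (files : List String) (buf tail : List Char),
      parseA_go files buf false (seg ++ tail) =
        parseA_go (emitPiecesB files buf (splitSpB seg)).1
          (emitPiecesB files buf (splitSpB seg)).2 false tail := by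
  induction seg with
  | nil => intro files buf tail; simp [splitSpB, emitPiecesB]
  | cons c r ih =>
    intro files buf tail
    have hc := hseg c (by simp)
    simp only [plainB, Bool.and_eq_true, bne_iff_ne, ne_eq] at hc
    have hr : ∀ x ∈ r, plainB x = true := fun x hx => hseg x (by simp [hx])
    by_cases hsp : c = ' '
    · subst hsp
      rw [List.cons_append, parseA_go_space_out]
      have hsplit : splitSpB (' ' :: r) = [] :: splitSpB r := by simp [splitSpB]
      rw [hsplit, emitPiecesB_empty_piece files buf _ (splitSpB_ne_nil r)]
      by_cases hb : buf.isEmpty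
      · have hbe : buf = [] := by simpa using hb
        rw [if_pos hb, if_pos hb, ih hr, hbe]
      · rw [if_neg hb, if_neg hb, ih hr]
    · rw [List.cons_append, parseA_go_false_char c files buf _ hc.1 hc.2 hsp, ih hr]
      obtain ⟨p, ps, hpr⟩ : ∃ p ps, splitSpB r = p :: ps := by
        cases hx : splitSpB r with
        | nil => exact absurd hx (splitSpB_ne_nil r)
        | cons p ps => exact ⟨p, ps, rfl⟩
      have hsplit : splitSpB (c :: r) = (c :: p) :: ps := by
        simp [splitSpB, hsp, hpr]
      rw [hsplit, emitPiecesB_cons_char, ← hpr]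

-- one-step rewrite lemmas for the B loop
theorem parseB_go_eq_nil (files : List String) (buf : List Char) (inside : Bool)
    (l : List Char) (h : l.dropWhile plainB = []) :
    parseB_go files buf inside l =
      (let fb := if inside then (files, buf ++ l.takeWhile plainB)
                 else emitPiecesB files buf (splitSpB (l.takeWhile plainB))
       if fb.2.isEmpty then fb.1 else fb.1 ++ [String.mk fb.2]) := by
  rw [parseB_go]
  split
  · rfl
  · rename_i b rest h2; rw [h] at h2; simp at h2

theorem parseB_go_eq_cons (files : List String) (buf : List Char) (inside : Bool)
    (l : List Char) (b : Char) (rest : List Char) (h : l.dropWhile plainB = b :: rest) :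
    parseB_go files buf inside l =
      (let fb := if inside then (files, buf ++ l.takeWhile plainB)
                 else emitPiecesB files buf (splitSpB (l.takeWhile plainB))
       parseB_go fb.1 fb.2 (b == '{') rest) := by
  rw [parseB_go]
  split
  · rename_i h2; rw [h] at h2; simp at h2
  · rename_i b' rest' h2
    rw [h] at h2
    injection h2 with e1 e2
    subst e1; subst e2
    rfl

-- the head of dropWhile fails the predicate
theorem head_dropWhile_false {α : Type} (p : α → Bool) :
    ∀ (l : List α) (b : α) (rest : List α), l.dropWhile p = b :: rest → p b = false := by
  intro l
  induction l with
  | nil => intro b rest h; simp [List.dropWhile] at h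
  | cons c r ih =>
    intro b rest h
    by_cases hc : p c
    · rw [List.dropWhile_cons_of_pos hc] at h; exact ih b rest h
    · rw [List.dropWhile_cons_of_neg hc] at h
      injection h with e1 _; subst e1
      simpa using hc

-- main equivalence, by strong induction on the length of the remaining input
theorem parseB_eq_parseA : ∀ (n : ℕ) (l : List Char), l.length ≤ n →
    ∀ (files : List String) (buf : List Char) (inside : Bool),
      parseB_go files buf inside l = parseA_go files buf inside l := by
  intro n
  induction n with
  | zero =>
    intro l hl files buf inside
    have : l = [] := List.eq_nil_of_length_eq_zero (Nat.le_zero.mp hl)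
    subst this
    rw [parseB_go_eq_nil files buf inside [] (by simp)]
    cases inside <;> simp [parseA_go, splitSpB, emitPiecesB]
  | succ n ih =>
    intro l hl files buf inside
    have hdecomp : l.takeWhile plainB ++ l.dropWhile plainB = l := List.takeWhile_append_dropWhile
    have hseg : ∀ c ∈ l.takeWhile plainB, plainB c = true := fun c hc => List.mem_takeWhile_imp hc
    cases hrest : l.dropWhile plainB with
    | nil =>
      rw [parseB_go_eq_nil files buf inside l hrest]
      have hl2 : l = l.takeWhile plainB ++ [] := by rw [← hrest, hdecomp]
      cases inside with
      | true =>
        conv_rhs => rw [hl2]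
        rw [parseA_seg_true _ hseg]
        simp [parseA_go]
      | false =>
        conv_rhs => rw [hl2]
        rw [parseA_seg_false _ hseg]
        simp [parseA_go]
    | cons b rest =>
      rw [parseB_go_eq_cons files buf inside l b rest hrest]
      have hl2 : l = l.takeWhile plainB ++ (b :: rest) := by rw [← hrest, hdecomp]
      have hb : plainB b = false := head_dropWhile_false plainB l b rest hrest
      have hb2 : b = '{' ∨ b = '}' := by
        simp only [plainB, Bool.and_eq_false_iff, bne_eq_false_iff_eq] at hb
        tauto
      have hlen : rest.length ≤ n := by
        have h1 : (b :: rest).length ≤ l.length := by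
          rw [← hrest]; exact List.length_dropWhile_le _ _
        simp at h1; omega
      cases inside with
      | true =>
        conv_rhs => rw [hl2]
        rw [parseA_seg_true _ hseg]
        rcases hb2 with hb2 | hb2 <;> subst hb2 <;>
          simp [parseA_go, ih rest hlen]
      | false =>
        conv_rhs => rw [hl2]
        rw [parseA_seg_false _ hseg]
        rcases hb2 with hb2 | hb2 <;> subst hb2 <;>
          simp [parseA_go, ih rest hlen]

-- ===== VERDICT (by name: the statement is the Claim_ definition above) =====
theorem parse_dnd_files_spec : Claim_equal_parse_dnd_files := by
  intro s _
  unfold Spec_parse_dnd_files parse_dnd_files parse_dnd_files_alt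
  rw [parseB_eq_parseA s.toList.length s.toList le_rfl]
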